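-- pv_equiv track=rewrite | github.com/dkn3r/python | Exercise #1/zxc.py | solution
-- ===== SOURCE A (Python) =====
-- def solution(data):
--     size = len(data)
--     for i in range(size-1):
--         if data[i] == '[':
--             for j in range(i,size):
--                 if data [j] == ']' and ((i % 2 == 0 and j % 2 != 0) or (i % 2 != 0 and j % 2 == 0)):
--                     break
--                 elif data [j] == ']' and ((i % 2 == 0 and j % 2 == 0) or (i % 2 != 0 and j % 2 != 0)):
--                     return False
--         elif data[i] == '{':
--             for o in range(i,size):
--                 if data [o] == '}' and ((i % 2 == 0 and o % 2 != 0) or (i % 2 != 0 and o % 2 == 0)):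
--                     break
--                 elif data [o] == '}' and ((i % 2 == 0 and o % 2 == 0) or (i % 2 != 0 and o % 2 != 0)):
--                     return False
--         elif data[i] == '(':
--             for k in range(i,size):
--                 if data [k] == ')' and ((i % 2 == 0 and k % 2 != 0) or (i % 2 != 0 and k % 2 == 0)):
--                     break
--                 elif data [k] == ')' and ((i % 2 == 0 and k % 2 == 0) or (i % 2 != 0 and k % 2 != 0)):
--                     return False
-- ===== SOURCE B (Python) =====
-- def solution(data):
--     # One right-to-left pass: remember the next index of each closing-bracket
--     # type; each opener is checked against that remembered index.
--     res = None
--     nb = nc = np = None  # next index of ']', '}', ')'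
--     for i in range(len(data) - 1, -1, -1):
--         ch = data[i]
--         if ch == '[':
--             j = nb
--         elif ch == '{':
--             j = nc
--         elif ch == '(':
--             j = np
--         else:
--             j = None
--         if j is not None and (j - i) % 2 == 0:
--             res = False
--         if ch == ']':
--             nb = i
--         elif ch == '}':
--             nc = i
--         elif ch == ')':
--             np = i
--     return res
-- ===== Notes on version B (the rewrite author's own statement) =====
-- stated objective: alternative
-- what changed: A rescans the rest of the string for every opening bracket (nested loops); B makes a single right-to-left pass remembering the next index of each closing-bracket type and checks each opener against that remembered index, trading A's early exit for a one-pass scan.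
import Mathlib
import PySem

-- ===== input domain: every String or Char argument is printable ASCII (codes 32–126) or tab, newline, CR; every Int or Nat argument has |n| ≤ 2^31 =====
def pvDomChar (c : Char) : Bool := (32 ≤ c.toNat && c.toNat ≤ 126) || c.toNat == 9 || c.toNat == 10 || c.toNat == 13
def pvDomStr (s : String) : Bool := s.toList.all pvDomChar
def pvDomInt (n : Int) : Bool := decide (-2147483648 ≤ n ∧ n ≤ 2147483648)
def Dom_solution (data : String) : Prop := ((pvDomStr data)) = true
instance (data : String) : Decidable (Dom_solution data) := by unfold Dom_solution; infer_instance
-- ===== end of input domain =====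

-- B replaces A's per-opener rescans by one right-to-left pass that remembers the
-- next index of each closing-bracket type (objective: alternative one-pass algorithm).

-- ===== PORT A =====
-- inner loop 'for j in range(i, size)': returns some false on 'return False',
-- none on 'break' or normal exhaustion (both continue the outer loop).
def pvInnerA (l : List Char) (c : Char) (i : Nat) : List Nat → Option Bool
  | [] => none
  | j :: js =>
    if l.getD j ' ' = c ∧ ((i % 2 = 0 ∧ j % 2 ≠ 0) ∨ (i % 2 ≠ 0 ∧ j % 2 = 0)) then none
    else if l.getD j ' ' = c ∧ ((i % 2 = 0 ∧ j % 2 = 0) ∨ (i % 2 ≠ 0 ∧ j % 2 ≠ 0)) then some false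
    else pvInnerA l c i js

-- outer loop 'for i in range(size-1)' (indices always in range, so getD is exact)
def pvOuterA (l : List Char) : List Nat → Option Bool
  | [] => none
  | i :: is =>
    if l.getD i ' ' = '[' then
      match pvInnerA l ']' i (List.range' i (l.length - i)) with
      | some b => some b
      | none => pvOuterA l is
    else if l.getD i ' ' = '{' then
      match pvInnerA l '}' i (List.range' i (l.length - i)) with
      | some b => some b
      | none => pvOuterA l is
    else if l.getD i ' ' = '(' then
      match pvInnerA l ')' i (List.range' i (l.length - i)) with
      | some b => some b
      | none => pvOuterA l is
    else pvOuterA l is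

def solution (data : String) : Option Bool :=
  pvOuterA data.toList (List.range (data.toList.length - 1))

-- ===== PORT B =====
-- one pass 'for i in range(len(data)-1, -1, -1)' with next-closer indices nb nc np
def pvLoopB (l : List Char) : List Nat → Option Nat → Option Nat → Option Nat →
    Option Bool → Option Bool
  | [], _, _, _, res => res
  | i :: is, nb, nc, np, res =>
    let ch := l.getD i ' '
    let j : Option Nat :=
      if ch = '[' then nb else if ch = '{' then nc else if ch = '(' then np else none
    let res' : Option Bool :=
      match j with
      | some j => if ((j : Int) - (i : Int)) % 2 = 0 then some false else res
      | none => res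
    if ch = ']' then pvLoopB l is (some i) nc np res'
    else if ch = '}' then pvLoopB l is nb (some i) np res'
    else if ch = ')' then pvLoopB l is nb nc (some i) res'
    else pvLoopB l is nb nc np res'

def solution_alt (data : String) : Option Bool :=
  pvLoopB data.toList (List.range data.toList.length).reverse none none none none

-- ===== PRECONDITION & SPEC =====
def Spec_solution (data : String) (out : Option Bool) : Prop := out = solution_alt data
instance (data : String) (out : Option Bool) : Decidable (Spec_solution data out) := by unfold Spec_solution; infer_instance

-- ===== CLAIM (what is proved, stated in full; the proofs are below) =====
def Claim_equal_solution : Prop := ∀ (data : String), Dom_solution data → Spec_solution data (solution data)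

-- ===== LEMMAS AND PROOFS =====

-- first index j in the list with l[j] = c
def findC (l : List Char) (c : Char) : List Nat → Option Nat
  | [] => none
  | j :: js => if l.getD j ' ' = c then some j else findC l c js

-- the matching closer of an opener (none otherwise)
def closerOf (ch : Char) : Option Char :=
  if ch = '[' then some ']' else if ch = '{' then some '}'
  else if ch = '(' then some ')' else none

-- index i is a violation: it holds an opener whose next matching closer has the same parity
def badAt (l : List Char) (i : Nat) : Bool :=
  match closerOf (l.getD i ' ') with
  | none => false
  | some c =>
    match findC l c (List.range' (i + 1) (l.length - (i + 1))) with
    | none => false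
    | some j => decide (i % 2 = j % 2)

def anyBad (l : List Char) (idxs : List Nat) : Option Bool :=
  if idxs.any (badAt l) then some false else none

lemma innerA_eq (l : List Char) (c : Char) (i : Nat) (idxs : List Nat) :
    pvInnerA l c i idxs =
      (match findC l c idxs with
       | none => none
       | some j => if i % 2 = j % 2 then some false else none) := by
  induction idxs with
  | nil => rfl
  | cons j js ih =>
    unfold pvInnerA findC
    by_cases hc : l.getD j ' ' = c
    · by_cases hp : i % 2 = j % 2
      · have h1 : ¬(l.getD j ' ' = c ∧ ((i % 2 = 0 ∧ j % 2 ≠ 0) ∨ (i % 2 ≠ 0 ∧ j % 2 = 0))) := by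
          rintro ⟨-, h⟩; omega
        have h2 : l.getD j ' ' = c ∧ ((i % 2 = 0 ∧ j % 2 = 0) ∨ (i % 2 ≠ 0 ∧ j % 2 ≠ 0)) :=
          ⟨hc, by omega⟩
        rw [if_neg h1, if_pos h2, if_pos hc]
        simp [hp]
      · have h1 : l.getD j ' ' = c ∧ ((i % 2 = 0 ∧ j % 2 ≠ 0) ∨ (i % 2 ≠ 0 ∧ j % 2 = 0)) :=
          ⟨hc, by omega⟩
        rw [if_pos h1, if_pos hc]
        simp [hp]
    · have h1 : ¬(l.getD j ' ' = c ∧ ((i % 2 = 0 ∧ j % 2 ≠ 0) ∨ (i % 2 ≠ 0 ∧ j % 2 = 0))) := by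
        rintro ⟨h, -⟩; exact hc h
      have h2 : ¬(l.getD j ' ' = c ∧ ((i % 2 = 0 ∧ j % 2 = 0) ∨ (i % 2 ≠ 0 ∧ j % 2 ≠ 0))) := by
        rintro ⟨h, -⟩; exact hc h
      rw [if_neg h1, if_neg h2, if_neg hc, ih]

-- the inner scan starting AT i equals the scan starting AFTER i when l[i] is not the closer
lemma findC_from_self (l : List Char) (c : Char) (i : Nat) (hi : i < l.length)
    (hne : l.getD i ' ' ≠ c) :
    findC l c (List.range' i (l.length - i)) =
      findC l c (List.range' (i + 1) (l.length - (i + 1))) := by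
  have h : l.length - i = (l.length - (i + 1)) + 1 := by omega
  rw [h, List.range'_succ,
    show findC l c (i :: List.range' (i + 1) (l.length - (i + 1))) =
      if l.getD i ' ' = c then some i else findC l c (List.range' (i + 1) (l.length - (i + 1)))
      from rfl,
    if_neg hne]

-- badAt at an opener, with the outer match reduced
lemma badAt_of_closer (l : List Char) (i : Nat) (c : Char)
    (hco : closerOf (l.getD i ' ') = some c) :
    badAt l i = (match findC l c (List.range' (i + 1) (l.length - (i + 1))) with
                 | none => false
                 | some j => decide (i % 2 = j % 2)) := by
  unfold badAt; rw [hco]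

-- A's whole inner-loop step at an opener index i equals badAt
lemma innerA_badAt (l : List Char) (i : Nat) (c ch : Char) (hi : i < l.length)
    (hch : l.getD i ' ' = ch) (hc : closerOf ch = some c) (hne : ch ≠ c) :
    pvInnerA l c i (List.range' i (l.length - i)) =
      (if badAt l i then some false else none) := by
  rw [innerA_eq, findC_from_self l c i hi (by rw [hch]; exact hne),
    badAt_of_closer l i c (by rw [hch]; exact hc)]
  generalize findC l c (List.range' (i + 1) (l.length - (i + 1))) = F
  cases F with
  | none => rfl
  | some j => by_cases hp : i % 2 = j % 2 <;> simp [hp]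

lemma anyBad_cons (l : List Char) (i : Nat) (is : List Nat) :
    anyBad l (i :: is) = if badAt l i then some false else anyBad l is := by
  unfold anyBad
  by_cases hb : badAt l i <;> by_cases hr : is.any (badAt l) <;> simp [hb, hr]

lemma outerA_eq (l : List Char) (idxs : List Nat) (h : ∀ i ∈ idxs, i < l.length) :
    pvOuterA l idxs = anyBad l idxs := by
  induction idxs with
  | nil => rfl
  | cons i is ih =>
    have hi : i < l.length := h i (by simp)
    have ihs := ih (fun k hk => h k (by simp [hk]))
    unfold pvOuterA
    rw [anyBad_cons]
    by_cases h1 : l.getD i ' ' = '['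
    · rw [if_pos h1, innerA_badAt l i ']' '[' hi h1 (by decide) (by decide)]
      by_cases hbb : badAt l i
      · rw [if_pos hbb, if_pos hbb]
      · rw [if_neg hbb, if_neg hbb]; exact ihs
    · rw [if_neg h1]
      by_cases h2 : l.getD i ' ' = '{'
      · rw [if_pos h2, innerA_badAt l i '}' '{' hi h2 (by decide) (by decide)]
        by_cases hbb : badAt l i
        · rw [if_pos hbb, if_pos hbb]
        · rw [if_neg hbb, if_neg hbb]; exact ihs
      · rw [if_neg h2]
        by_cases h3 : l.getD i ' ' = '('
        · rw [if_pos h3, innerA_badAt l i ')' '(' hi h3 (by decide) (by decide)]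
          by_cases hbb : badAt l i
          · rw [if_pos hbb, if_pos hbb]
          · rw [if_neg hbb, if_neg hbb]; exact ihs
        · rw [if_neg h3]
          have hbad : badAt l i = false := by
            unfold badAt closerOf
            rw [if_neg h1, if_neg h2, if_neg h3]
          rw [hbad]
          simpa using ihs

-- B's loop invariant: after processing indices ≥ m, the three registers hold the
-- first matching-closer index ≥ m and res records whether any bad opener ≥ m exists.
lemma loopB_inv (l : List Char) (m : Nat) : m ≤ l.length →
    pvLoopB l (List.range m).reverse
      (findC l ']' (List.range' m (l.length - m)))
      (findC l '}' (List.range' m (l.length - m)))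
      (findC l ')' (List.range' m (l.length - m)))
      (anyBad l (List.range' m (l.length - m)))
    = anyBad l (List.range' 0 l.length) := by
  induction m with
  | zero => intro _; simp [pvLoopB]
  | succ m ih =>
    intro hm
    have hm' : m ≤ l.length := by omega
    have hmlt : m < l.length := hm
    have hsplit : List.range' m (l.length - m) = m :: List.range' (m + 1) (l.length - (m + 1)) := by
      have h : l.length - m = (l.length - (m + 1)) + 1 := by omega
      rw [h, List.range'_succ]
    have hrev : (List.range (m + 1)).reverse = m :: (List.range m).reverse := by
      rw [List.range_succ]; simp
    set R := List.range' (m + 1) (l.length - (m + 1)) with hR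
    rw [hsplit] at ih
    have IH := ih hm'
    rw [hrev]
    -- a found closer index lies in R, hence beyond m
    have hjmem : ∀ (c : Char) (j : Nat), findC l c R = some j → m + 1 ≤ j := by
      intro c j hf
      have hmem : ∀ (idxs : List Nat), findC l c idxs = some j → j ∈ idxs := by
        intro idxs
        induction idxs with
        | nil => intro h; simp [findC] at h
        | cons a as iha =>
          intro h
          unfold findC at h
          by_cases ha : l.getD a ' ' = c
          · rw [if_pos ha] at h
            injection h with h
            simp [h]
          · rw [if_neg ha] at h
            simp [iha h]
      have h2 := hmem R hf
      rw [hR] at h2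
      simp [List.mem_range'] at h2
      omega
    -- res after the body equals anyBad over m :: R
    have hres : ∀ (c : Char), closerOf (l.getD m ' ') = some c →
        (match findC l c R with
         | some j => if ((j : Int) - (m : Int)) % 2 = 0 then some false else anyBad l R
         | none => anyBad l R) = anyBad l (m :: R) := by
      intro c hco
      rw [anyBad_cons]
      cases hf : findC l c R with
      | none =>
        have hb : badAt l m = false := by rw [badAt_of_closer l m c hco, ← hR, hf]
        simp [hb]
      | some j =>
        have hj' := hjmem c j hf
        have hb : badAt l m = decide (m % 2 = j % 2) := by rw [badAt_of_closer l m c hco, ← hR, hf]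
        have hpar : (((j : Int) - (m : Int)) % 2 = 0) ↔ (m % 2 = j % 2) := by
          constructor <;> intro h <;> omega
        by_cases hp : m % 2 = j % 2
        · simp [hpar.mpr hp, hb, hp]
        · have hni : ¬((j : Int) - (m : Int)) % 2 = 0 := fun h => hp (hpar.mp h)
          simp [hni, hb, hp]
    have hresN : closerOf (l.getD m ' ') = none → anyBad l R = anyBad l (m :: R) := by
      intro hco
      rw [anyBad_cons]
      have hb : badAt l m = false := by unfold badAt; rw [hco]
      simp [hb]
    -- a cons-step equation for findC
    have findC_cons : ∀ (c : Char), findC l c (m :: R) =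
        if l.getD m ' ' = c then some m else findC l c R := fun _ => rfl
    simp only [pvLoopB]
    by_cases h1 : l.getD m ' ' = '['
    · rw [h1]
      rw [if_pos (rfl : ('[' : Char) = '[')]
      rw [if_neg (by decide : ¬('[' : Char) = ']'), if_neg (by decide : ¬('[' : Char) = '}'),
        if_neg (by decide : ¬('[' : Char) = ')')]
      rw [hres ']' (by rw [h1]; rfl)]
      rw [show findC l ']' R = findC l ']' (m :: R) by
            rw [findC_cons ']', if_neg (show ¬l.getD m ' ' = ']' by rw [h1]; decide)]]
      rw [show findC l '}' R = findC l '}' (m :: R) by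
            rw [findC_cons '}', if_neg (show ¬l.getD m ' ' = '}' by rw [h1]; decide)]]
      rw [show findC l ')' R = findC l ')' (m :: R) by
            rw [findC_cons ')', if_neg (show ¬l.getD m ' ' = ')' by rw [h1]; decide)]]
      exact IH
    · by_cases h2 : l.getD m ' ' = '{'
      · rw [h2]
        rw [if_neg (by decide : ¬('{' : Char) = '['), if_pos (rfl : ('{' : Char) = '{')]
        rw [if_neg (by decide : ¬('{' : Char) = ']'), if_neg (by decide : ¬('{' : Char) = '}'),
          if_neg (by decide : ¬('{' : Char) = ')')]
        rw [hres '}' (by rw [h2]; rfl)]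
        rw [show findC l ']' R = findC l ']' (m :: R) by
              rw [findC_cons ']', if_neg (show ¬l.getD m ' ' = ']' by rw [h2]; decide)]]
        rw [show findC l '}' R = findC l '}' (m :: R) by
              rw [findC_cons '}', if_neg (show ¬l.getD m ' ' = '}' by rw [h2]; decide)]]
        rw [show findC l ')' R = findC l ')' (m :: R) by
              rw [findC_cons ')', if_neg (show ¬l.getD m ' ' = ')' by rw [h2]; decide)]]
        exact IH
      · by_cases h3 : l.getD m ' ' = '('
        · rw [h3]
          rw [if_neg (by decide : ¬('(' : Char) = '['), if_neg (by decide : ¬('(' : Char) = '{'),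
            if_pos (rfl : ('(' : Char) = '(')]
          rw [if_neg (by decide : ¬('(' : Char) = ']'), if_neg (by decide : ¬('(' : Char) = '}'),
            if_neg (by decide : ¬('(' : Char) = ')')]
          rw [hres ')' (by rw [h3]; rfl)]
          rw [show findC l ']' R = findC l ']' (m :: R) by
                rw [findC_cons ']', if_neg (show ¬l.getD m ' ' = ']' by rw [h3]; decide)]]
          rw [show findC l '}' R = findC l '}' (m :: R) by
                rw [findC_cons '}', if_neg (show ¬l.getD m ' ' = '}' by rw [h3]; decide)]]
          rw [show findC l ')' R = findC l ')' (m :: R) by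
                rw [findC_cons ')', if_neg (show ¬l.getD m ' ' = ')' by rw [h3]; decide)]]
          exact IH
        · by_cases h4 : l.getD m ' ' = ']'
          · rw [h4]
            rw [if_neg (by decide : ¬(']' : Char) = '['), if_neg (by decide : ¬(']' : Char) = '{'),
              if_neg (by decide : ¬(']' : Char) = '(')]
            rw [if_pos (rfl : (']' : Char) = ']')]
            rw [show findC l ']' (m :: R) = some m by
                  rw [findC_cons ']', if_pos h4]] at IH
            rw [show findC l '}' (m :: R) = findC l '}' R by
                  rw [findC_cons '}', if_neg (show ¬l.getD m ' ' = '}' by rw [h4]; decide)]] at IH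
            rw [show findC l ')' (m :: R) = findC l ')' R by
                  rw [findC_cons ')', if_neg (show ¬l.getD m ' ' = ')' by rw [h4]; decide)]] at IH
            rw [← hresN (by rw [h4]; rfl)] at IH
            exact IH
          · by_cases h5 : l.getD m ' ' = '}'
            · rw [h5]
              rw [if_neg (by decide : ¬('}' : Char) = '['), if_neg (by decide : ¬('}' : Char) = '{'),
                if_neg (by decide : ¬('}' : Char) = '(')]
              rw [if_neg (by decide : ¬('}' : Char) = ']'), if_pos (rfl : ('}' : Char) = '}')]
              rw [show findC l '}' (m :: R) = some m by
                    rw [findC_cons '}', if_pos h5]] at IH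
              rw [show findC l ']' (m :: R) = findC l ']' R by
                    rw [findC_cons ']', if_neg (show ¬l.getD m ' ' = ']' by rw [h5]; decide)]] at IH
              rw [show findC l ')' (m :: R) = findC l ')' R by
                    rw [findC_cons ')', if_neg (show ¬l.getD m ' ' = ')' by rw [h5]; decide)]] at IH
              rw [← hresN (by rw [h5]; rfl)] at IH
              exact IH
            · by_cases h6 : l.getD m ' ' = ')'
              · rw [h6]
                rw [if_neg (by decide : ¬(')' : Char) = '['), if_neg (by decide : ¬(')' : Char) = '{'),
                  if_neg (by decide : ¬(')' : Char) = '(')]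
                rw [if_neg (by decide : ¬(')' : Char) = ']'), if_neg (by decide : ¬(')' : Char) = '}'),
                  if_pos (rfl : (')' : Char) = ')')]
                rw [show findC l ')' (m :: R) = some m by
                      rw [findC_cons ')', if_pos h6]] at IH
                rw [show findC l ']' (m :: R) = findC l ']' R by
                      rw [findC_cons ']', if_neg (show ¬l.getD m ' ' = ']' by rw [h6]; decide)]] at IH
                rw [show findC l '}' (m :: R) = findC l '}' R by
                      rw [findC_cons '}', if_neg (show ¬l.getD m ' ' = '}' by rw [h6]; decide)]] at IH
                rw [← hresN (by rw [h6]; rfl)] at IH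
                exact IH
              · rw [if_neg h1, if_neg h2, if_neg h3]
                rw [if_neg h4, if_neg h5, if_neg h6]
                rw [show findC l ']' (m :: R) = findC l ']' R by
                      rw [findC_cons ']', if_neg h4]] at IH
                rw [show findC l '}' (m :: R) = findC l '}' R by
                      rw [findC_cons '}', if_neg h5]] at IH
                rw [show findC l ')' (m :: R) = findC l ')' R by
                      rw [findC_cons ')', if_neg h6]] at IH
                rw [← hresN (by unfold closerOf; rw [if_neg h1, if_neg h2, if_neg h3])] at IH
                exact IH
-- the last index can never be a violation: there is nothing after it
lemma badAt_last (l : List Char) (n : Nat) (hn : n + 1 = l.length) :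
    badAt l n = false := by
  cases hclo : closerOf (l.getD n ' ') with
  | none => unfold badAt; rw [hclo]
  | some c =>
    rw [badAt_of_closer l n c hclo, show l.length - (n + 1) = 0 from by omega,
      List.range'_zero]
    rfl

-- ===== VERDICT (by name: the statement is the Claim_ definition above) =====
theorem solution_spec : Claim_equal_solution := by
  intro data _
  unfold Spec_solution solution solution_alt
  rw [outerA_eq data.toList (List.range (data.toList.length - 1))
    (fun i hi => by have := List.mem_range.mp hi; omega)]
  have hB := loopB_inv data.toList data.toList.length le_rfl
  rw [Nat.sub_self, List.range'_zero] at hB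
  rw [show findC data.toList ']' [] = none from rfl,
    show findC data.toList '}' [] = none from rfl,
    show findC data.toList ')' [] = none from rfl,
    show anyBad data.toList [] = none from rfl] at hB
  rw [hB, ← List.range_eq_range']
  by_cases h0 : data.toList.length = 0
  · rw [h0]
  · have hk : data.toList.length - 1 + 1 = data.toList.length := by omega
    rw [show List.range data.toList.length
        = List.range (data.toList.length - 1) ++ [data.toList.length - 1] from by
      conv_lhs => rw [← hk]
      rw [List.range_succ]]
    unfold anyBad
    rw [List.any_append, List.any_cons, List.any_nil,
      badAt_last data.toList (data.toList.length - 1) hk]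
    simp
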